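-- pv_equiv track=rewrite | github.com/rohitg00/ai-engineering-from-scratch | phases/14-agent-engineering/28-orchestration-patterns/code/main.py | swarm
-- ===== SOURCE A (Python) =====
-- from typing import Any, Callable
--
-- def classify(text: str) -> str:
--     t = text.lower()
--     if "refund" in t:
--         return "refund"
--     if "crash" in t or "error" in t or "bug" in t:
--         return "bug"
--     if "pricing" in t or "quote" in t:
--         return "sales"
--     return "sales"
--
-- SPECIALISTS: dict[str, Callable[[str], str]] = {
--     "refund": lambda t: f"refund handled: {t[:30]}",
--     "bug":    lambda t: f"bug logged: {t[:30]}",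
--     "sales":  lambda t: f"quote sent: {t[:30]}",
-- }
--
-- def swarm(tasks: list[str]) -> tuple[list[str], int]:
--     trace: list[str] = []
--     ops = 0
--     for task in tasks:
--         current = list(SPECIALISTS)[0]
--         hops = 0
--         while hops < 3:
--             ops += 1
--             label = classify(task)
--             if current == label:
--                 trace.append(f"swarm[{current}]: {SPECIALISTS[current](task)}")
--                 break
--             trace.append(f"swarm[{current}] handoff -> {label}")
--             current = label
--             hops += 1
--     return trace, ops
-- ===== SOURCE B (Python) =====
-- from typing import Any, Callable
--
-- def classify(text: str) -> str:
--     t = text.lower()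
--     if "refund" in t:
--         return "refund"
--     if "crash" in t or "error" in t or "bug" in t:
--         return "bug"
--     if "pricing" in t or "quote" in t:
--         return "sales"
--     return "sales"
--
-- SPECIALISTS: dict[str, Callable[[str], str]] = {
--     "refund": lambda t: f"refund handled: {t[:30]}",
--     "bug":    lambda t: f"bug logged: {t[:30]}",
--     "sales":  lambda t: f"quote sent: {t[:30]}",
-- }
--
-- def swarm(tasks: list[str]) -> tuple[list[str], int]:
--     start = next(iter(SPECIALISTS))
--     labels = [classify(task) for task in tasks]
--     trace = [
--         line
--         for task, label in zip(tasks, labels)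
--         for line in (
--             [f"swarm[{start}]: {SPECIALISTS[start](task)}"]
--             if label == start
--             else [f"swarm[{start}] handoff -> {label}",
--                   f"swarm[{label}]: {SPECIALISTS[label](task)}"]
--         )
--     ]
--     ops = sum(1 if label == start else 2 for label in labels)
--     return trace, ops
-- ===== Notes on version B (the rewrite author's own statement) =====
-- stated objective: simpler
-- what changed: Replaces the bounded while-loop handoff simulation and mutable accumulators with a direct case analysis per task: classify once, emit one line (refund) or a handoff pair (otherwise) via a flat comprehension, and compute ops as a sum of 1-or-2 per task.
import Mathlib
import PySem

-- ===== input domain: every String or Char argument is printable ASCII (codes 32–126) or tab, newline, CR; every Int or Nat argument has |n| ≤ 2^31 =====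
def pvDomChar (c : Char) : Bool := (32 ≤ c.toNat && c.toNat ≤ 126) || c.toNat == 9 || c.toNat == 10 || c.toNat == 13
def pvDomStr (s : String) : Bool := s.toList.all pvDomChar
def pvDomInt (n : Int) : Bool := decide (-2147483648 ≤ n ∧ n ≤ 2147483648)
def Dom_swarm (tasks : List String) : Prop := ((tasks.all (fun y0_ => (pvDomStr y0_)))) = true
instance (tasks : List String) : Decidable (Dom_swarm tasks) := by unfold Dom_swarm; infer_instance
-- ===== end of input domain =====

-- B replaces A's bounded while-loop handoff simulation with a direct per-task case analysis
-- (one classification, one or two trace lines, ops = 1 or 2); objective: simpler.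

-- ===== PORT A =====
-- shared module helper classify (used by both ports, as in the Python module)
def classify (text : String) : String :=
  let t := PySem.Str.lower text
  if PySem.Str.isIn "refund" t then "refund"
  else if PySem.Str.isIn "crash" t || PySem.Str.isIn "error" t || PySem.Str.isIn "bug" t then "bug"
  else if PySem.Str.isIn "pricing" t || PySem.Str.isIn "quote" t then "sales"
  else "sales"

-- the SPECIALISTS dict of lambdas, as a function from label to handler result
def specialist (label : String) (t : String) : String :=
  let cut := PySem.Str.slice t none (some 30)   -- t[:30]
  if label == "refund" then "refund handled: " ++ cut
  else if label == "bug" then "bug logged: " ++ cut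
  else "quote sent: " ++ cut

-- the 'while hops < 3' loop, fuel = the loop condition itself
def swarmLoop (task current : String) (hops : Nat) (trace : List String) (ops : Int) :
    List String × Int :=
  if _h : hops < 3 then
    let ops := ops + 1
    let label := classify task
    if current == label then
      (trace ++ ["swarm[" ++ current ++ "]: " ++ specialist current task], ops)
    else
      swarmLoop task label (hops + 1) (trace ++ ["swarm[" ++ current ++ "] handoff -> " ++ label]) ops
  else (trace, ops)
termination_by 3 - hops

def swarm (tasks : List String) : List String × Int :=
  tasks.foldl (fun st task => swarmLoop task "refund" 0 st.1 st.2) ([], 0)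

-- ===== PORT B =====
def swarm_alt (tasks : List String) : List String × Int :=
  let start := "refund"  -- next(iter(SPECIALISTS))
  let labels := tasks.map classify
  let trace := (tasks.zip labels).flatMap (fun p =>
    if p.2 == start then
      ["swarm[" ++ start ++ "]: " ++ specialist start p.1]
    else
      ["swarm[" ++ start ++ "] handoff -> " ++ p.2,
       "swarm[" ++ p.2 ++ "]: " ++ specialist p.2 p.1])
  let ops := (labels.map (fun label => if label == start then (1 : Int) else 2)).sum
  (trace, ops)

-- ===== PRECONDITION & SPEC =====
def Spec_swarm (tasks : List String) (out : List String × Int) : Prop := out = swarm_alt tasks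
instance (tasks : List String) (out : List String × Int) : Decidable (Spec_swarm tasks out) := by unfold Spec_swarm; infer_instance

-- ===== CLAIM (what is proved, stated in full; the proofs are below) =====
def Claim_equal_swarm : Prop := ∀ (tasks : List String), Dom_swarm tasks → Spec_swarm tasks (swarm tasks)

-- ===== LEMMAS AND PROOFS =====

-- one task through A's while loop = B's case analysis on its label
theorem swarmLoop_refund (task : String) (trace : List String) (ops : Int) :
    swarmLoop task "refund" 0 trace ops =
      if classify task == "refund" then
        (trace ++ ["swarm[refund]: " ++ specialist "refund" task], ops + 1)
      else
        (trace ++ ["swarm[refund] handoff -> " ++ classify task,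
                   "swarm[" ++ classify task ++ "]: " ++ specialist (classify task) task],
         ops + 2) := by
  by_cases h : classify task = "refund"
  · simp [swarmLoop, h]
  · have hb : (("refund" : String) == classify task) = false := by
      simp [BEq.beq]; exact fun e => h e.symm
    have hb' : (classify task == "refund") = false := by
      simp [BEq.beq]; exact h
    rw [swarmLoop]
    simp only [show (0 : Nat) < 3 by omega, dite_true, hb]
    rw [swarmLoop]
    simp [hb', List.append_assoc]
    ring

theorem swarm_foldl_eq (tasks : List String) (trace : List String) (ops : Int) :
    tasks.foldl (fun st task => swarmLoop task "refund" 0 st.1 st.2) (trace, ops) =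
      (trace ++ (tasks.zip (tasks.map classify)).flatMap (fun p =>
        if p.2 == "refund" then
          ["swarm[refund]: " ++ specialist "refund" p.1]
        else
          ["swarm[refund] handoff -> " ++ p.2,
           "swarm[" ++ p.2 ++ "]: " ++ specialist p.2 p.1]),
       ops + ((tasks.map classify).map (fun label => if label == "refund" then (1 : Int) else 2)).sum) := by
  induction tasks generalizing trace ops with
  | nil => simp
  | cons t ts ih =>
    simp only [List.foldl_cons, List.map_cons, List.zip_cons_cons, List.flatMap_cons,
      List.sum_cons]
    rw [swarmLoop_refund]
    by_cases h : classify t = "refund"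
    · simp [h, ih, List.append_assoc]; ring_nf
    · have hb : (classify t == "refund") = false := by simp [BEq.beq]; exact h
      simp [hb, ih, List.append_assoc]; ring_nf

-- ===== VERDICT (by name: the statement is the Claim_ definition above) =====
theorem swarm_spec : Claim_equal_swarm := by
  intro tasks _
  unfold Spec_swarm swarm swarm_alt
  rw [swarm_foldl_eq]
  simp
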